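-- pv_equiv track=rewrite | github.com/pabloschwarzenberg/grader | tema10_ej2/tema10_ej2_f347cd28020cb2f27d418524ddb4f426.py | esCambio
-- ===== SOURCE A (Python) =====
-- def esCambio(palabra1, palabra2):
--
--     strAux = ""
--
--     encontrada = False
--
--     i = 0
--
--     while i < len(palabra1) and not(encontrada):
--
--         if palabra1[i] != palabra2[i]:
--
--             encontrada = True
--
--             strAux = strAux + palabra2[i + 1 : len(palabra2)]
--
--         else:
--
--             strAux = strAux + palabra2[i]
--
--         i = i + 1
--
--     return strAux == palabra1
-- ===== SOURCE B (Python) =====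
-- def esCambio(palabra1, palabra2):
--     n = len(palabra1)
--     # first index where the words disagree (lazy scan: accesses palabra2[j]
--     # in the same left-to-right order as A, so it raises at the same point)
--     i = next((j for j in range(n) if palabra1[j] != palabra2[j]), None)
--     if i is None:
--         return palabra2[:n] == palabra1
--     return palabra2[:i] + palabra2[i + 1:] == palabra1
-- ===== Notes on version B (the rewrite author's own statement) =====
-- stated objective: simpler
-- what changed: Replaces A's fused scan-and-build loop (accumulating a string char by char with a found-flag) with a find-first-mismatch-index pass followed by a single slice-delete-and-compare.
import Mathlib
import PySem

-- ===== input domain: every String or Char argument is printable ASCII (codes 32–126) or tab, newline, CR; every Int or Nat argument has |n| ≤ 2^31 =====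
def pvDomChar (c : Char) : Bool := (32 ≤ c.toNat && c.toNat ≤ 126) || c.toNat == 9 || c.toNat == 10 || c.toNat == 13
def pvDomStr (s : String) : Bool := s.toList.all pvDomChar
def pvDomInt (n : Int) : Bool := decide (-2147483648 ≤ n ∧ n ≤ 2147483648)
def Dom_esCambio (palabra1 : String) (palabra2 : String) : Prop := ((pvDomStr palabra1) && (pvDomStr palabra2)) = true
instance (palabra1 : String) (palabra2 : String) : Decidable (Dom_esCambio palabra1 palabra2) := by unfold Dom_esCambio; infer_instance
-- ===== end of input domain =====

-- B replaces A's fused scan-and-build loop with find-first-mismatch + one slice compare (simpler); same O(n) cost.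
-- ===== PORT A =====
-- while-loop of A: fuel = len(palabra1) - i, so fuel > 0 ↔ i < len(palabra1).
-- palabra2[i] is ported as getD: exact whenever i < len(palabra2); Python raises
-- IndexError otherwise, and Pre_esCambio excludes exactly those inputs.
def esCambioGo (p1 p2 : List Char) : Nat → Nat → List Char → Bool
  | 0, _, acc => acc == p1
  | fuel + 1, i, acc =>
    if p1.getD i default != p2.getD i default then
      -- encontrada = True: loop ends after this iteration; palabra2[i+1:len2] = drop (i+1)
      (acc ++ p2.drop (i + 1)) == p1
    else
      esCambioGo p1 p2 fuel (i + 1) (acc ++ [p2.getD i default])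

def esCambio (palabra1 : String) (palabra2 : String) : Bool :=
  let p1 := palabra1.toList
  let p2 := palabra2.toList
  esCambioGo p1 p2 p1.length 0 []

-- ===== PORT B =====
-- next((j for j in range(n) if p1[j] != p2[j]), None) → find? over range n;
-- palabra2[:n], palabra2[:i], palabra2[i+1:] → take / drop (exact for these nonnegative bounds).
def esCambio_alt (palabra1 : String) (palabra2 : String) : Bool :=
  let p1 := palabra1.toList
  let p2 := palabra2.toList
  let n := p1.length
  match (List.range n).find? (fun j => p1.getD j default != p2.getD j default) with
  | none => p2.take n == p1
  | some i => (p2.take i ++ p2.drop (i + 1)) == p1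

-- ===== PRECONDITION & SPEC =====
-- Pre_ excludes exactly the inputs where A raises IndexError (and B raises at the
-- same index): palabra2 a proper prefix of palabra1.
def Pre_esCambio (palabra1 : String) (palabra2 : String) : Prop :=
  ¬ (palabra2.toList.length < palabra1.toList.length ∧
     palabra2.toList = palabra1.toList.take palabra2.toList.length)
instance (palabra1 : String) (palabra2 : String) : Decidable (Pre_esCambio palabra1 palabra2) := by unfold Pre_esCambio; infer_instance

def pvWitness_esCambio : String × String := ("ab", "aXb")

def Spec_esCambio (palabra1 : String) (palabra2 : String) (out : Bool) : Prop := out = esCambio_alt palabra1 palabra2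
instance (palabra1 : String) (palabra2 : String) (out : Bool) : Decidable (Spec_esCambio palabra1 palabra2 out) := by unfold Spec_esCambio; infer_instance

-- ===== CLAIM (what is proved, stated in full; the proofs are below) =====
def Claim_equal_esCambio : Prop := ∀ (palabra1 : String) (palabra2 : String), Dom_esCambio palabra1 palabra2 → Pre_esCambio palabra1 palabra2 → Spec_esCambio palabra1 palabra2 (esCambio palabra1 palabra2)

-- ===== LEMMAS AND PROOFS =====

-- if the first mismatch over [0,n) is at i (all j<i agree, pred i holds), find? returns some i
lemma find?_range_some (n i : Nat) (p : Nat → Bool) (hin : i < n) (hp : p i = true)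
    (hmin : ∀ j < i, p j = false) : (List.range n).find? p = some i := by
  induction n with
  | zero => omega
  | succ m ih =>
    rcases Nat.lt_succ_iff_lt_or_eq.mp hin with h | h
    · rw [List.range_succ, List.find?_append, ih h, Option.or]
    · subst h
      rw [List.range_succ, List.find?_append]
      have : (List.range i).find? p = none := by
        rw [List.find?_eq_none]
        intro x hx
        simp only [List.mem_range] at hx
        simp [hmin x hx]
      simp [this, hp]

-- all positions agree ⇒ find? over range is none
lemma find?_range_none (n : Nat) (p : Nat → Bool) (h : ∀ j < n, p j = false) :
    (List.range n).find? p = none := by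
  rw [List.find?_eq_none]
  intro x hx
  simp only [List.mem_range] at hx
  simp [h x hx]

-- if all j < k agree (getD), and k ≤ lengths, then p2.take k = p1.take k (used for the Pre_ contradiction)
lemma take_eq_of_agree (p1 p2 : List Char) (k : Nat) (hk1 : k ≤ p1.length) (hk2 : k ≤ p2.length)
    (h : ∀ j < k, p1.getD j default = p2.getD j default) :
    p1.take k = p2.take k := by
  apply List.ext_getElem
  · simp [hk1, hk2]
  · intro j hj1 hj2
    simp only [List.length_take] at hj1
    have hjk : j < k := lt_of_lt_of_le hj1 (min_le_left _ _)
    have hj1' : j < p1.length := lt_of_lt_of_le hjk hk1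
    have hj2' : j < p2.length := lt_of_lt_of_le hjk hk2
    have := h j hjk
    simpa [List.getElem_take, List.getD_eq_getElem?_getD, List.getElem?_eq_getElem, hj1', hj2'] using this

-- main loop invariant: started at i with acc = p2.take i and all earlier positions agreeing,
-- the A-loop computes exactly B's find?-and-slice answer
lemma esCambioGo_eq (p1 p2 : List Char)
    (hpre : ¬ (p2.length < p1.length ∧ p2 = p1.take p2.length)) :
    ∀ fuel i, fuel + i = p1.length → i ≤ p2.length →
    (∀ j < i, p1.getD j default = p2.getD j default) →
    esCambioGo p1 p2 fuel i (p2.take i) =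
      (match (List.range p1.length).find? (fun j => p1.getD j default != p2.getD j default) with
       | none => p2.take p1.length == p1
       | some k => (p2.take k ++ p2.drop (k + 1)) == p1) := by
  intro fuel
  induction fuel with
  | zero =>
    intro i hfi hi2 hmatch
    have hin : i = p1.length := by omega
    subst hin
    have hnone : (List.range p1.length).find? (fun j => p1.getD j default != p2.getD j default) = none := by
      apply find?_range_none
      intro j hj
      simp only [bne_eq_false_iff_eq]
      exact hmatch j hj
    simp only [esCambioGo]
    rw [hnone]
  | succ f ih =>
    intro i hfi hi2 hmatch
    have hin : i < p1.length := by omega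
    by_cases hc : p1.getD i default = p2.getD i default
    · -- no mismatch at i: loop continues
      -- first, i < p2.length (else palabra2 is a proper prefix of palabra1, excluded by Pre_)
      have hi2' : i < p2.length := by
        by_contra h
        have hieq : p2.length = i := by omega
        apply hpre
        refine ⟨by omega, ?_⟩
        have ht := take_eq_of_agree p1 p2 i (by omega) (by omega) hmatch
        rw [hieq]
        calc p2 = p2.take i := by rw [← hieq]; exact List.take_length.symm
          _ = p1.take i := ht.symm
      have hstep : p2.take i ++ [p2.getD i default] = p2.take (i + 1) := by
        rw [List.take_add_one]
        congr 1
        rw [List.getElem?_eq_getElem hi2']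
        simp [List.getD_eq_getElem?_getD, List.getElem?_eq_getElem hi2']
      have hmatch' : ∀ j < i + 1, p1.getD j default = p2.getD j default := by
        intro j hj
        rcases Nat.lt_succ_iff_lt_or_eq.mp hj with h | h
        · exact hmatch j h
        · subst h; exact hc
      simp only [esCambioGo]
      rw [if_neg (by simpa using hc), hstep]
      exact ih (i + 1) (by omega) (by omega) hmatch'
    · -- mismatch at i: loop stops; find? = some i
      have hfind : (List.range p1.length).find? (fun j => p1.getD j default != p2.getD j default) = some i := by
        apply find?_range_some _ _ _ hin
        · exact bne_iff_ne.mpr hc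
        · intro j hj
          simp only [bne_eq_false_iff_eq]
          exact hmatch j hj
      simp only [esCambioGo]
      rw [if_pos (bne_iff_ne.mpr hc), hfind]

-- ===== VERDICT (by name: the statement is the Claim_ definition above) =====
theorem esCambio_spec : Claim_equal_esCambio := by
  intro palabra1 palabra2 _ hpre
  unfold Spec_esCambio esCambio esCambio_alt
  have h := esCambioGo_eq palabra1.toList palabra2.toList (by simpa [Pre_esCambio] using hpre)
    palabra1.toList.length 0 (by omega) (by omega) (by intro j hj; omega)
  simpa using h
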